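-- pv_equiv track=rewrite | github.com/BinbinGood/Algorithms | 中级班/class01/最少袋数的苹果.py | Minbags2
-- ===== SOURCE A (Python) =====
-- def Minbags2(N):
--     if N < 6:
--         return -1
--     dp = [[-1] * (N + 1) for _ in range(int(N / 6) + 1)]
--     for i in range(int(N / 6), -1, -1):
--         for rest in range(N + 1):
--             if rest == 0:
--                 dp[i][rest] = 0
--                 continue
--             six = getvalue(dp, N, i + 1, rest - 6)
--             eight = getvalue(dp, N, i + 1, rest - 8)
--             if six == -1 and eight == -1:
--                 dp[i][rest] = -1
--             elif six == -1:
--                 dp[i][rest] = eight + 1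
--             elif eight == -1:
--                 dp[i][rest] = six + 1
--             else:
--                 dp[i][rest] = 1 + min(six, eight)
--     return dp[0][N]
--
-- def getvalue(dp, N, i, rest):
--     if i > int(N / 6) or rest < 0:
--         return -1
--     return dp[i][rest]
-- ===== SOURCE B (Python) =====
-- def Minbags2(N):
--     if N < 6:
--         return -1
--     for b in range(N // 8, -1, -1):
--         r = N - 8 * b
--         if r % 6 == 0:
--             return b + r // 6
--     return -1
-- ===== Notes on version B (the rewrite author's own statement) =====
-- stated objective: faster
-- what changed: Replaces the quadratic-size dynamic-programming table and its getvalue helper by a single descending scan over the count b of eight-apple bags, returning b plus the number of six-apple bags for the first b whose remainder is divisible by six; taking the largest feasible b minimizes the total bag count, matching the DP's minimum.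
import Mathlib
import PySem

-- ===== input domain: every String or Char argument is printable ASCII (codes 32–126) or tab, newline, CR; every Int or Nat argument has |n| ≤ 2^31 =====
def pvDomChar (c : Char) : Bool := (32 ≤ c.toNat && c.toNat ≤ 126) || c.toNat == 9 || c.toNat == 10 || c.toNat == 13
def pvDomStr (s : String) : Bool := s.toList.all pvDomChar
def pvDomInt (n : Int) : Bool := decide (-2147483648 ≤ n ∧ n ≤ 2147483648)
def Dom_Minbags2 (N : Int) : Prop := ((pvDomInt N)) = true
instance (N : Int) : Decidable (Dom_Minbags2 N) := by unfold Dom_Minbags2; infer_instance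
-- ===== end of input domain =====

-- B replaces A's (N/6+1)x(N+1) DP table by a descending scan over the number of 8-bags
-- with a divisibility test (return value only; measured faster in a timing run's mechanism: fewer/cheaper iterations).

-- ===== PORT A =====
-- getvalue(dp, N, i, rest); the dp[i][rest] read is in range on every call A makes
-- (so pyGetD with an arbitrary default is exact there).
def pvGetvalue (dp : List (List Int)) (N i rest : Int) : Int :=
  if i > PySem.Int.truncdiv N 6 ∨ rest < 0 then -1
  else PySem.List.pyGetD (PySem.List.pyGetD dp i []) rest (-1)

-- dp[i][rest] = v ; both indices are nonnegative and in range on every call A makes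
def pvSetCell (dp : List (List Int)) (i rest : Int) (v : Int) : List (List Int) :=
  dp.set i.toNat ((PySem.List.pyGetD dp i []).set rest.toNat v)

-- body of A's inner 'for rest in range(N+1)' loop
def pvBody (N i : Int) (dp : List (List Int)) (rest : Int) : List (List Int) :=
  if rest = 0 then pvSetCell dp i rest 0
  else
    let six := pvGetvalue dp N (i + 1) (rest - 6)
    let eight := pvGetvalue dp N (i + 1) (rest - 8)
    if six = -1 ∧ eight = -1 then pvSetCell dp i rest (-1)
    else if six = -1 then pvSetCell dp i rest (eight + 1)
    else if eight = -1 then pvSetCell dp i rest (six + 1)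
    else pvSetCell dp i rest (1 + min six eight)

-- A's inner loop for one value of i
def pvRowLoop (N i : Int) (dp : List (List Int)) : List (List Int) :=
  (PySem.List.pyRange 0 (N + 1) 1).foldl (pvBody N i) dp

-- int(N/6) is exact as truncdiv for |N| ≤ 2^31 < 2^53
def Minbags2 (N : Int) : Int :=
  if N < 6 then -1
  else
    let dp0 := (PySem.List.pyRange 0 (PySem.Int.truncdiv N 6 + 1) 1).map
      (fun _ => PySem.List.pyRepeat [(-1 : Int)] (N + 1))
    let dp := (PySem.List.pyRange (PySem.Int.truncdiv N 6) (-1) (-1)).foldl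
      (fun dp i => pvRowLoop N i dp) dp0
    PySem.List.pyGetD (PySem.List.pyGetD dp 0 []) N (-1)  -- dp[0][N], in range

-- ===== PORT B =====
-- body of B's 'for b in range(N // 8, -1, -1)' loop with early return
def pvScanStep (N : Int) (acc : Option Int) (b : Int) : Option Int :=
  match acc with
  | some r => some r
  | none =>
      if PySem.Int.mod (N - 8 * b) 6 = 0 then
        some (b + PySem.Int.floordiv (N - 8 * b) 6)
      else none

def Minbags2_alt (N : Int) : Int :=
  if N < 6 then -1
  else
    ((PySem.List.pyRange (PySem.Int.floordiv N 8) (-1) (-1)).foldl (pvScanStep N) none).getD (-1)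

-- ===== PRECONDITION & SPEC =====
def Spec_Minbags2 (N : Int) (out : Int) : Prop := out = Minbags2_alt N
instance (N : Int) (out : Int) : Decidable (Spec_Minbags2 N out) := by unfold Spec_Minbags2; infer_instance

-- ===== CLAIM (what is proved, stated in full; the proofs are below) =====
def Claim_equal_Minbags2 : Prop := ∀ (N : Int), Dom_Minbags2 N → Spec_Minbags2 N (Minbags2 N)

-- ===== LEMMAS AND PROOFS =====

-- the closed form both programs compute: -1 unless N = 0 or (N even, N ≥ 6, N ≠ 10), else ceil(N/8)
def pvCF (r : Int) : Int :=
  if r = 0 then 0 else if r < 6 ∨ r % 2 = 1 ∨ r = 10 then -1 else (r + 7) / 8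

-- the combine step of A's DP cell
def pvCombine (six eight : Int) : Int :=
  if six = -1 ∧ eight = -1 then -1
  else if six = -1 then eight + 1
  else if eight = -1 then six + 1
  else 1 + min six eight

def pvStep (prev : Int → Int) (rest : Int) : Int :=
  if rest = 0 then 0 else pvCombine (prev (rest - 6)) (prev (rest - 8))

-- pvG k = A's DP row (N//6 - k) as a function of rest
def pvG : Nat → Int → Int
  | 0 => pvStep (fun _ => -1)
  | (k + 1) => pvStep (fun r => if r < 0 then -1 else pvG k r)

set_option maxHeartbeats 1000000 in
lemma pvCF_step (r : Int) (h1 : 1 ≤ r) :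
    pvCombine (if r - 6 < 0 then -1 else pvCF (r - 6)) (if r - 8 < 0 then -1 else pvCF (r - 8))
      = pvCF r := by
  unfold pvCombine pvCF
  simp only [min_def]
  split_ifs <;> first | omega | tauto

lemma pvG_eq_cf : ∀ (k : Nat) (r : Int), 0 ≤ r → r ≤ 6 * k + 5 → pvG k r = pvCF r := by
  intro k
  induction k with
  | zero =>
    intro r h0 h5
    show pvStep (fun _ => -1) r = pvCF r
    unfold pvStep pvCombine pvCF
    beta_reduce
    simp only [min_def]
    split_ifs <;> first | omega | tauto
  | succ k ih =>
    intro r h0 h5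
    show pvStep (fun x => if x < 0 then -1 else pvG k x) r = pvCF r
    by_cases hr : r = 0
    · subst hr; rfl
    · have e6 : (if r - 6 < 0 then (-1 : Int) else pvG k (r - 6))
          = (if r - 6 < 0 then -1 else pvCF (r - 6)) := by
        split_ifs with hh
        · rfl
        · exact ih _ (by omega) (by omega)
      have e8 : (if r - 8 < 0 then (-1 : Int) else pvG k (r - 8))
          = (if r - 8 < 0 then -1 else pvCF (r - 8)) := by
        split_ifs with hh
        · rfl
        · exact ih _ (by omega) (by omega)
      calc pvStep (fun x => if x < 0 then -1 else pvG k x) r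
          = pvCombine (if r - 6 < 0 then -1 else pvG k (r - 6))
              (if r - 8 < 0 then -1 else pvG k (r - 8)) := by
            unfold pvStep; rw [if_neg hr]
        _ = pvCF r := by rw [e6, e8]; exact pvCF_step r (by omega)

-- descending range helpers
lemma pyRange_down_nil {a : Int} (h : a < 0) : PySem.List.pyRange a (-1) (-1) = [] := by
  simp [PySem.List.pyRange, show ¬(-1 : Int) < a by omega]

lemma pyRange_down_eq {a : Int} (h : 0 ≤ a) :
    PySem.List.pyRange a (-1) (-1)
      = (List.range (a + 1).toNat).map (fun k : Nat => a - (k : Int)) := by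
  simp only [PySem.List.pyRange, show ((-1 : Int) = 0) = False by simp, if_false,
    show ¬(0 : Int) < -1 by norm_num, show (-1 : Int) < a by omega, if_pos]
  have hc : (a - -1 + - -1 - 1) / - -1 = a + 1 := by norm_num
  rw [hc]
  exact List.map_congr_left (fun k _ => by push_cast; ring)

lemma pyRange_down_cons {a : Int} (h : 0 ≤ a) :
    PySem.List.pyRange a (-1) (-1) = a :: PySem.List.pyRange (a - 1) (-1) (-1) := by
  rcases eq_or_lt_of_le h with h0 | h0
  · rw [← h0, pyRange_down_eq le_rfl, pyRange_down_nil (by norm_num)]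
    norm_num
  · rw [pyRange_down_eq h, pyRange_down_eq (a := a - 1) (by omega),
      show (a + 1).toNat = (a - 1 + 1).toNat + 1 by omega, List.range_succ_eq_map,
      List.map_cons, List.map_map]
    refine List.cons_eq_cons.mpr ⟨by norm_num, List.map_congr_left ?_⟩
    intro t _
    simp only [Function.comp]
    push_cast
    ring

-- ===== B-side =====
lemma scan_some (N v : Int) (l : List Int) : l.foldl (pvScanStep N) (some v) = some v := by
  induction l with
  | nil => rfl
  | cons x l ih => simpa [pvScanStep] using ih

lemma scan_down (N a : Int) (h : 0 ≤ a) :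
    (PySem.List.pyRange a (-1) (-1)).foldl (pvScanStep N) none
      = if PySem.Int.mod (N - 8 * a) 6 = 0 then some (a + PySem.Int.floordiv (N - 8 * a) 6)
        else (PySem.List.pyRange (a - 1) (-1) (-1)).foldl (pvScanStep N) none := by
  rw [pyRange_down_cons h, List.foldl_cons]
  show (PySem.List.pyRange (a - 1) (-1) (-1)).foldl (pvScanStep N) (pvScanStep N none a) = _
  unfold pvScanStep
  split_ifs with hc
  · exact scan_some _ _ _
  · rfl

lemma scan_none (N : Int) :
    ∀ (n : Nat) (a : Int), a < n → (∀ b, 0 ≤ b → b ≤ a → ¬ (6 ∣ (N - 8 * b))) →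
    (PySem.List.pyRange a (-1) (-1)).foldl (pvScanStep N) none = none := by
  intro n
  induction n with
  | zero =>
    intro a ha _
    rw [pyRange_down_nil (by exact_mod_cast ha)]
    rfl
  | succ n ih =>
    intro a ha hnone
    by_cases h0 : a < 0
    · rw [pyRange_down_nil h0]
      rfl
    · rw [scan_down N a (by omega),
        if_neg (fun hc => hnone a (by omega) le_rfl ((PySem.Int.mod_eq_zero_iff_dvd _ _).mp hc))]
      exact ih (a - 1) (by omega) (fun b hb1 hb2 => hnone b hb1 (by omega))

lemma scan_found (N : Int) :
    ∀ (n : Nat) (a : Int), a < n → ∀ b0, 0 ≤ b0 → b0 ≤ a → (6 ∣ (N - 8 * b0)) →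
    (∀ b, b0 < b → b ≤ a → ¬ (6 ∣ (N - 8 * b))) →
    (PySem.List.pyRange a (-1) (-1)).foldl (pvScanStep N) none = some (b0 + (N - 8 * b0) / 6) := by
  intro n
  induction n with
  | zero => intro a ha b0 hb0 hba _ _; omega
  | succ n ih =>
    intro a ha b0 hb0 hba hdvd hmax
    rw [scan_down N a (by omega)]
    by_cases hda : (6 : Int) ∣ (N - 8 * a)
    · have hab : a = b0 := by
        by_contra hne
        exact hmax a (by omega) le_rfl hda
      rw [if_pos ((PySem.Int.mod_eq_zero_iff_dvd _ _).mpr hda), hab,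
        PySem.Int.floordiv_eq_ediv_of_pos (by norm_num)]
    · rw [if_neg (fun hc => hda ((PySem.Int.mod_eq_zero_iff_dvd _ _).mp hc))]
      have hne : b0 ≠ a := fun he => hda (he ▸ hdvd)
      exact ih (a - 1) (by omega) b0 hb0 (by omega) hdvd
        (fun b hb1 hb2 => hmax b hb1 (by omega))

lemma alt_eq_cf (N : Int) (h : 6 ≤ N) : Minbags2_alt N = pvCF N := by
  by_cases h10 : N = 10
  · subst h10; decide
  · unfold Minbags2_alt
    rw [if_neg (by omega), PySem.Int.floordiv_eq_ediv_of_pos (by norm_num)]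
    by_cases h2 : (2 : Int) ∣ N
    · have hq : 8 * (N / 8) ≤ N ∧ N < 8 * (N / 8) + 8 := by omega
      by_cases d1 : (6 : Int) ∣ (N - 8 * (N / 8))
      · rw [scan_found N ((N / 8).toNat + 1) (N / 8) (by omega) (N / 8) (by omega) le_rfl d1
          (fun b hb1 hb2 => by omega)]
        unfold pvCF
        rw [if_neg (by omega), if_neg (by omega)]
        simp only [Option.getD_some]
        omega
      · by_cases d2 : (6 : Int) ∣ (N - 8 * (N / 8 - 1))
        · rw [scan_found N ((N / 8).toNat + 1) (N / 8) (by omega) (N / 8 - 1) (by omega)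
            (by omega) d2
            (fun b hb1 hb2 hd => by
              have hb : b = N / 8 := by omega
              subst hb
              exact d1 hd)]
          unfold pvCF
          rw [if_neg (by omega), if_neg (by omega)]
          simp only [Option.getD_some]
          omega
        · have d3 : (6 : Int) ∣ (N - 8 * (N / 8 - 2)) := by omega
          rw [scan_found N ((N / 8).toNat + 1) (N / 8) (by omega) (N / 8 - 2) (by omega)
            (by omega) d3 (fun b hb1 hb2 hd => by
              rcases (by omega : b = N / 8 ∨ b = N / 8 - 1) with hb | hb <;> subst hb
              · exact d1 hd
              · exact d2 hd)]
          unfold pvCF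
          rw [if_neg (by omega), if_neg (by omega)]
          simp only [Option.getD_some]
          omega
    · rw [scan_none N (N.toNat + 1) (N / 8) (by omega)
        (fun b hb1 hb2 hd => by omega)]
      unfold pvCF
      rw [if_neg (by omega), if_pos (by omega)]
      rfl

-- ===== A-side =====
lemma trunc6 (N : Int) (h : 0 ≤ N) : PySem.Int.truncdiv N 6 = N / 6 := by
  unfold PySem.Int.truncdiv
  exact Int.tdiv_eq_ediv_of_nonneg h

-- the all-(-1) row, row (N//6 - k) of the finished part of the table, the finished tail, and
-- the table state after the outer loop has processed k rows
def pvInit (N : Int) : List Int := List.replicate (N + 1).toNat (-1)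
def pvRowOf (N : Int) (k : Nat) : List Int :=
  (List.range (N + 1).toNat).map (fun r : Nat => pvG k (r : Int))
def pvTail (N : Int) (k : Nat) : List (List Int) :=
  (List.range k).map (fun t : Nat => pvRowOf N (k - 1 - t))
def pvS (N : Int) (k : Nat) : List (List Int) :=
  List.replicate ((N / 6).toNat + 1 - k) (pvInit N) ++ pvTail N k

lemma pvBody_merge (N i : Int) (dp : List (List Int)) (rest : Int) :
    pvBody N i dp rest
      = pvSetCell dp i rest (pvStep (fun x => pvGetvalue dp N (i + 1) x) rest) := by
  simp only [pvBody, pvStep, pvCombine]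
  split_ifs <;> rfl

lemma pvGetvalue_congr {dp dp' : List (List Int)} (N i : Int)
    (h : PySem.List.pyGetD dp i [] = PySem.List.pyGetD dp' i []) (r : Int) :
    pvGetvalue dp N i r = pvGetvalue dp' N i r := by
  unfold pvGetvalue
  rw [h]

lemma read_mid (L R : List (List Int)) (x : List Int) (j : Nat) (hL : L.length = j) :
    PySem.List.pyGetD (L ++ x :: R) ((j : Int) + 1) [] = R.getD 0 [] := by
  rw [show ((j : Int) + 1) = ((j + 1 : Nat) : Int) by push_cast; ring, PySem.List.pyGetD_natCast]
  simp [List.getD_eq_getElem?_getD, List.getElem?_append_right, hL]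

lemma read_at (L R : List (List Int)) (x : List Int) (j : Nat) (hL : L.length = j) :
    PySem.List.pyGetD (L ++ x :: R) ((j : Int)) [] = x := by
  rw [PySem.List.pyGetD_natCast]
  simp [List.getD_eq_getElem?_getD, hL]

lemma set_mid (L R : List (List Int)) (x y : List Int) (j : Nat) (hL : L.length = j) :
    (L ++ x :: R).set j y = L ++ y :: R := by
  rw [List.set_append]
  simp [hL]

lemma inner_aux (N : Int) (j : Nat) (L R : List (List Int)) (hL : L.length = j) :
    ∀ k : Nat, k ≤ (N + 1).toNat →
    ((List.range k).map (fun t : Nat => (t : Int))).foldl (pvBody N (j : Int)) (L ++ pvInit N :: R)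
      = L ++ ((List.range k).map (fun r : Nat =>
            pvStep (fun x => pvGetvalue (L ++ pvInit N :: R) N ((j : Int) + 1) x) (r : Int))
          ++ List.replicate ((N + 1).toNat - k) (-1)) :: R := by
  intro k
  induction k with
  | zero => intro _; simp [pvInit]
  | succ k ih =>
    intro hk
    rw [List.range_succ, List.map_append, List.foldl_append, ih (by omega)]
    simp only [List.map_cons, List.map_nil, List.foldl_cons, List.foldl_nil]
    set prev := fun x => pvGetvalue (L ++ pvInit N :: R) N ((j : Int) + 1) x with hprev
    set row := (List.range k).map (fun r : Nat => pvStep prev (r : Int))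
      ++ List.replicate ((N + 1).toNat - k) (-1) with hrow
    rw [pvBody_merge]
    have hgv : ∀ x : Int,
        pvGetvalue (L ++ row :: R) N ((j : Int) + 1) x = prev x := by
      intro x
      rw [hprev]
      exact pvGetvalue_congr N _ (by rw [read_mid L R _ j hL, read_mid L R _ j hL]) x
    have hstepeq : pvStep (fun x => pvGetvalue (L ++ row :: R) N ((j : Int) + 1) x) (k : Int)
        = pvStep prev (k : Int) := by
      unfold pvStep
      simp only [hgv]
    rw [hstepeq]
    unfold pvSetCell
    rw [read_at L R row j hL]
    rw [show ((j : Int)).toNat = j by omega, show ((k : Int)).toNat = k by omega]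
    rw [set_mid L R row _ j hL]
    congr 1
    congr 1
    rw [hrow, List.set_append]
    have hlen : ((List.range k).map (fun r : Nat => pvStep prev (r : Int))).length = k := by
      simp
    rw [if_neg (by omega)]
    rw [hlen, Nat.sub_self]
    rw [show (N + 1).toNat - k = ((N + 1).toNat - (k + 1)) + 1 by omega, List.replicate_succ,
      List.set_cons_zero]
    simp

lemma prev_at_S (N : Int) (hN : 6 ≤ N) (k : Nat) (hk : k ≤ (N / 6).toNat) (x : Int) (hx : x ≤ N) :
    pvGetvalue (pvS N k) N ((((N / 6).toNat - k : Nat) : Int) + 1) x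
      = (match k with
          | 0 => -1
          | (k' + 1) => if x < 0 then -1 else pvG k' x) := by
  have hm : ((N / 6).toNat : Int) = N / 6 := by omega
  cases k with
  | zero =>
    unfold pvGetvalue
    rw [if_pos]
    left
    rw [trunc6 N (by omega)]
    omega
  | succ k' =>
    by_cases hx0 : x < 0
    · unfold pvGetvalue
      rw [if_pos (Or.inr hx0)]
      simp [hx0]
    · unfold pvGetvalue
      rw [if_neg (by rw [trunc6 N (by omega)]; omega)]
      have hidx : (pvS N (k' + 1)) =
          List.replicate ((N / 6).toNat - (k' + 1) + 1) (pvInit N) ++ pvTail N (k' + 1) := by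
        unfold pvS
        congr 1
        congr 1
        omega
      rw [hidx]
      rw [show ((((N / 6).toNat - (k' + 1) : Nat) : Int) + 1)
          = (((N / 6).toNat - (k' + 1) + 1 : Nat) : Int) by push_cast; ring,
        PySem.List.pyGetD_natCast]
      rw [List.getD_eq_getElem?_getD, List.getElem?_append_right (by simp)]
      simp only [List.length_replicate, Nat.sub_self]
      unfold pvTail
      rw [List.getElem?_map]
      rw [List.getElem?_range (by omega)]
      simp only [Option.map_some, Option.getD_some]
      rw [show k' + 1 - 1 - 0 = k' by omega]
      unfold pvRowOf
      rw [PySem.List.pyGetD_of_nonneg _ _ (by omega)]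
      rw [PySem.List.getD_map_range _ _ _ _ (by omega)]
      rw [Int.toNat_of_nonneg (by omega)]
      simp [hx0]

lemma step_at_S (N : Int) (hN : 6 ≤ N) (k : Nat) (hk : k ≤ (N / 6).toNat)
    (r : Nat) (hr : r < (N + 1).toNat) :
    pvStep (fun x => pvGetvalue (pvS N k) N ((((N / 6).toNat - k : Nat) : Int) + 1) x) (r : Int)
      = pvG k (r : Int) := by
  have h6 : ((r : Int) - 6) ≤ N := by omega
  have h8 : ((r : Int) - 8) ≤ N := by omega
  cases k with
  | zero =>
    show _ = pvStep (fun _ => -1) (r : Int)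
    unfold pvStep
    beta_reduce
    rw [prev_at_S N hN 0 hk _ h6, prev_at_S N hN 0 hk _ h8]
  | succ k' =>
    show _ = pvStep (fun x => if x < 0 then -1 else pvG k' x) (r : Int)
    unfold pvStep
    beta_reduce
    rw [prev_at_S N hN (k' + 1) hk _ h6, prev_at_S N hN (k' + 1) hk _ h8]

lemma tail_succ (N : Int) (k : Nat) : pvTail N (k + 1) = pvRowOf N k :: pvTail N k := by
  unfold pvTail
  rw [List.range_succ_eq_map, List.map_cons, List.map_map]
  refine List.cons_eq_cons.mpr ⟨?_, ?_⟩
  · rw [show k + 1 - 1 - 0 = k from by omega]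
  · refine List.map_congr_left ?_
    intro t _
    simp only [Function.comp, Nat.succ_eq_add_one]
    rw [show k + 1 - 1 - (t + 1) = k - 1 - t from by omega]

lemma rowLoop_at_S (N : Int) (hN : 6 ≤ N) (k : Nat) (hk : k ≤ (N / 6).toNat) :
    pvRowLoop N ((((N / 6).toNat - k : Nat)) : Int) (pvS N k) = pvS N (k + 1) := by
  have hsplit : pvS N k
      = List.replicate ((N / 6).toNat - k) (pvInit N) ++ pvInit N :: pvTail N k := by
    unfold pvS
    rw [show (N / 6).toNat + 1 - k = ((N / 6).toNat - k) + 1 by omega, List.replicate_succ',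
      List.append_assoc]
    rfl
  unfold pvRowLoop
  rw [show (N + 1 : Int) = (((N + 1).toNat : Nat) : Int) by omega, PySem.List.pyRange_zero_natCast]
  rw [hsplit]
  rw [inner_aux N ((N / 6).toNat - k) _ _ (List.length_replicate) (N + 1).toNat le_rfl]
  simp only [Nat.sub_self, List.replicate_zero, List.append_nil]
  have hmap : ((List.range (N + 1).toNat).map (fun r : Nat =>
      pvStep (fun x => pvGetvalue
          (List.replicate ((N / 6).toNat - k) (pvInit N) ++ pvInit N :: pvTail N k)
          N ((((N / 6).toNat - k : Nat) : Int) + 1) x) (r : Int)))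
      = pvRowOf N k := by
    unfold pvRowOf
    refine List.map_congr_left ?_
    intro r hr
    rw [← hsplit]
    exact step_at_S N hN k hk r (List.mem_range.mp hr)
  rw [hmap]
  unfold pvS
  rw [show (N / 6).toNat + 1 - (k + 1) = (N / 6).toNat - k from by omega, tail_succ]

lemma outer_aux (N : Int) (hN : 6 ≤ N) :
    ∀ j : Nat, j ≤ (N / 6).toNat + 1 →
    (PySem.List.pyRange ((j : Int) - 1) (-1) (-1)).foldl (fun dp i => pvRowLoop N i dp)
        (pvS N ((N / 6).toNat + 1 - j))
      = pvS N ((N / 6).toNat + 1) := by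
  intro j
  induction j with
  | zero =>
    intro _
    rw [pyRange_down_nil (by norm_num)]
    rfl
  | succ j ih =>
    intro hj
    rw [show ((j + 1 : Nat) : Int) - 1 = ((j : Nat) : Int) by push_cast; ring]
    rw [pyRange_down_cons (Int.natCast_nonneg j), List.foldl_cons]
    have hk1 : (N / 6).toNat + 1 - (j + 1) = (N / 6).toNat - j := by omega
    rw [hk1]
    have hstep : pvRowLoop N ((j : Nat) : Int) (pvS N ((N / 6).toNat - j))
        = pvS N ((N / 6).toNat - j + 1) := by
      have h := rowLoop_at_S N hN ((N / 6).toNat - j) (by omega)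
      rwa [show (N / 6).toNat - ((N / 6).toNat - j) = j by omega] at h
    show (PySem.List.pyRange ((j : Int) - 1) (-1) (-1)).foldl (fun dp i => pvRowLoop N i dp)
        (pvRowLoop N ((j : Nat) : Int) (pvS N ((N / 6).toNat - j))) = _
    rw [hstep, show (N / 6).toNat - j + 1 = (N / 6).toNat + 1 - j by omega]
    exact ih (by omega)

lemma A_eq_G (N : Int) (h : 6 ≤ N) : Minbags2 N = pvG (N / 6).toNat N := by
  unfold Minbags2
  rw [if_neg (by omega), trunc6 N (by omega)]
  have hdp0 : (PySem.List.pyRange 0 (N / 6 + 1) 1).map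
      (fun _ => PySem.List.pyRepeat [(-1 : Int)] (N + 1)) = pvS N 0 := by
    rw [show N / 6 + 1 = (((N / 6).toNat + 1 : Nat) : Int) by omega,
      PySem.List.pyRange_zero_natCast, List.map_map]
    rw [show ((fun _ => PySem.List.pyRepeat [(-1 : Int)] (N + 1))
        ∘ (fun k : Nat => (k : Int)))
      = (fun _ : Nat => PySem.List.pyRepeat [(-1 : Int)] (N + 1)) from rfl]
    rw [List.map_const', List.length_range, PySem.List.pyRepeat_singleton]
    unfold pvS pvTail pvInit
    simp
  rw [hdp0]
  have hout := outer_aux N h ((N / 6).toNat + 1) le_rfl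
  rw [show (((N / 6).toNat + 1 : Nat) : Int) - 1 = N / 6 by omega,
    show (N / 6).toNat + 1 - ((N / 6).toNat + 1) = 0 by omega] at hout
  show PySem.List.pyGetD (PySem.List.pyGetD
      ((PySem.List.pyRange (N / 6) (-1) (-1)).foldl (fun dp i => pvRowLoop N i dp) (pvS N 0))
      0 []) N (-1) = pvG (N / 6).toNat N
  rw [hout]
  unfold pvS
  simp only [Nat.sub_self, List.replicate_zero, List.nil_append]
  rw [show ((0 : Int)) = ((0 : Nat) : Int) from rfl, PySem.List.pyGetD_natCast]
  unfold pvTail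
  rw [List.getD_eq_getElem?_getD, List.getElem?_map, List.getElem?_range (by omega)]
  simp only [Option.map_some, Option.getD_some]
  rw [show (N / 6).toNat + 1 - 1 - 0 = (N / 6).toNat by omega]
  unfold pvRowOf
  rw [PySem.List.pyGetD_of_nonneg _ _ (by omega)]
  rw [PySem.List.getD_map_range _ _ _ _ (by omega)]
  rw [Int.toNat_of_nonneg (by omega)]

-- ===== VERDICT (by name: the statement is the Claim_ definition above) =====
theorem Minbags2_spec : Claim_equal_Minbags2 := by
  unfold Claim_equal_Minbags2
  intro N _
  unfold Spec_Minbags2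
  by_cases h : N < 6
  · simp [Minbags2, Minbags2_alt, h]
  · have h6 : 6 ≤ N := by omega
    rw [A_eq_G N h6, alt_eq_cf N h6, pvG_eq_cf _ _ (by omega) (by omega)]
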